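-- pv_equiv track=rewrite | github.com/henrysiegel17/eca | eca/period.py | meetingtime
-- ===== SOURCE A (Python) =====
-- def meetingtime(pt):
--     transient = pt[0]
--     period = pt[1]
--     time = 1
--     pos1 = 2
--     pos2 = 3
--     while (((pos2 - pos1) % period != 0) and pos1 > transient and pos2 > transient) or (
--         pos1 <= transient or pos2 <= transient
--     ):
--         pos1 += 1
--         pos2 += 2
--         time += 1
--     return time
-- ===== SOURCE B (Python) =====
-- def meetingtime(pt):
--     transient = pt[0]
--     period = pt[1]
--     p = abs(period)
--     lo = max(1, transient)
--     return -(-lo // p) * p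
-- ===== Notes on version B (the rewrite author's own statement) =====
-- stated objective: faster
-- what changed: Replaced the step-by-step chase loop by a closed form: the loop stops at the first time t >= max(1, transient) divisible by period, which is the ceiling division -(-max(1,transient)//abs(period))*abs(period).
import Mathlib
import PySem

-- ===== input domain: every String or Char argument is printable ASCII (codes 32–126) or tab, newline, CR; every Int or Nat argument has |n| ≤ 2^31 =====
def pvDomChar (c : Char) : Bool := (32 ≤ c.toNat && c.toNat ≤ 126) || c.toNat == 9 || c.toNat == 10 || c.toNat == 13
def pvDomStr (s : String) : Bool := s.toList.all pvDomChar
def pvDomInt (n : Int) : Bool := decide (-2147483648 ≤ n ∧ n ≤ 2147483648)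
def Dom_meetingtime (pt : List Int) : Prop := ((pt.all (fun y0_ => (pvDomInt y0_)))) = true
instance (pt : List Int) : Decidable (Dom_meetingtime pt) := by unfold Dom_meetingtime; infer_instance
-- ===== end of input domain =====

-- B replaces A's step-by-step chase loop by an O(1) ceiling-division closed form (faster, asymptotic).

-- ===== PORT A =====
-- A's while loop, fuel-bounded; the fuel (max 1 transient + |period|) is proved sufficient under Pre_.
def pvLoopA (transient period : Int) : Nat → Int → Int → Int → Int
  | 0, time, _, _ => time
  | fuel + 1, time, pos1, pos2 =>
    if (PySem.Int.mod (pos2 - pos1) period ≠ 0 ∧ transient < pos1 ∧ transient < pos2) ∨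
        (pos1 ≤ transient ∨ pos2 ≤ transient) then
      pvLoopA transient period fuel (time + 1) (pos1 + 1) (pos2 + 2)
    else time

def meetingtime (pt : List Int) : Int :=
  match PySem.List.pyGet? pt 0, PySem.List.pyGet? pt 1 with
  | some transient, some period =>
      pvLoopA transient period (max 1 transient + |period|).toNat 1 2 3
  | _, _ => 0

-- ===== PORT B =====
def meetingtime_alt (pt : List Int) : Int :=
  (((PySem.List.pyGet? pt 0).bind fun transient =>
    (PySem.List.pyGet? pt 1).map fun period =>
      let p := |period|
      let lo := max 1 transient
      (-(PySem.Int.floordiv (-lo) p)) * p).getD 0)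

-- ===== PRECONDITION & SPEC =====
-- Pre_ excludes exactly the inputs where Python A raises: lists shorter than 2 (IndexError)
-- and period = 0 (ZeroDivisionError in the loop condition).
def Pre_meetingtime (pt : List Int) : Prop :=
  2 ≤ pt.length ∧ PySem.List.pyGet? pt 1 ≠ some 0

instance (pt : List Int) : Decidable (Pre_meetingtime pt) := by unfold Pre_meetingtime; infer_instance

def pvWitness_meetingtime : List Int := [0, 1]

def Spec_meetingtime (pt : List Int) (out : Int) : Prop := out = meetingtime_alt pt
instance (pt : List Int) (out : Int) : Decidable (Spec_meetingtime pt out) := by unfold Spec_meetingtime; infer_instance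

-- ===== CLAIM (what is proved, stated in full; the proofs are below) =====
def Claim_equal_meetingtime : Prop := ∀ (pt : List Int), Dom_meetingtime pt → Pre_meetingtime pt → Spec_meetingtime pt (meetingtime pt)

-- ===== LEMMAS AND PROOFS =====

-- The loop, started at time t in its reachable state (pos1 = t+1, pos2 = 2t+1), returns the
-- first time s ≥ max 1 transient divisible by period, given enough fuel.
theorem pvLoopA_eq (transient period : Int) (s : Int)
    (hs1 : max 1 transient ≤ s) (hdvd : period ∣ s)
    (hmin : ∀ u : Int, max 1 transient ≤ u → period ∣ u → s ≤ u) :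
    ∀ (fuel : Nat) (t : Int), 1 ≤ t → t ≤ s → s - t ≤ (fuel : Int) →
      pvLoopA transient period fuel t (t + 1) (2 * t + 1) = s := by
  intro fuel
  induction fuel with
  | zero =>
      intro t ht1 hts hfuel
      have : t = s := by omega
      simp [pvLoopA, this]
  | succ n ih =>
      intro t ht1 hts hfuel
      by_cases hstop : t = s
      · subst hstop
        have hmod : PySem.Int.mod (2 * t + 1 - (t + 1)) period = 0 := by
          have : 2 * t + 1 - (t + 1) = t := by ring
          rw [this, PySem.Int.mod_eq_zero_iff_dvd]
          exact hdvd
        have hnc : ¬ ((PySem.Int.mod (2 * t + 1 - (t + 1)) period ≠ 0 ∧ transient < t + 1 ∧ transient < 2 * t + 1) ∨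
            (t + 1 ≤ transient ∨ 2 * t + 1 ≤ transient)) := by
          intro hc
          rcases hc with ⟨hm, _, _⟩ | h2
          · exact hm hmod
          · omega
        rw [pvLoopA, if_neg hnc]
      · -- t < s : the loop condition holds
        have htlt : t < s := lt_of_le_of_ne hts hstop
        have hcond : (PySem.Int.mod (2 * t + 1 - (t + 1)) period ≠ 0 ∧ transient < t + 1 ∧ transient < 2 * t + 1) ∨
            (t + 1 ≤ transient ∨ 2 * t + 1 ≤ transient) := by
          have ht' : 2 * t + 1 - (t + 1) = t := by ring
          by_cases hb : transient < t + 1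
          · left
            refine ⟨?_, hb, by omega⟩
            rw [ht']
            intro hmz
            have hdt : period ∣ t := (PySem.Int.mod_eq_zero_iff_dvd t period).mp hmz
            have : s ≤ t := hmin t (by omega) hdt
            omega
          · right; omega
        rw [pvLoopA, if_pos hcond]
        have h2 : 2 * t + 1 + 2 = 2 * (t + 1) + 1 := by ring
        have h1 : t + 1 + 1 = (t + 1) + 1 := rfl
        rw [h2]
        exact ih (t + 1) (by omega) (by omega) (by push_cast at hfuel ⊢; omega)

theorem meetingtime_main (transient period : Int) (hp : period ≠ 0) :
    pvLoopA transient period (max 1 transient + |period|).toNat 1 2 3 =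
      -(PySem.Int.floordiv (-(max 1 transient)) |period|) * |period| := by
  set lo := max 1 transient with hlo
  set p := |period| with hpdef
  have hppos : 0 < p := abs_pos.mpr hp
  set q : Int := -(PySem.Int.floordiv (-lo) p) with hq
  have hbr : (q - 1) * p < lo ∧ lo ≤ q * p :=
    (PySem.Int.neg_floordiv_neg_eq_iff_of_pos hppos).mp hq.symm
  set s : Int := q * p with hs
  have hs1 : lo ≤ s := hbr.2
  have hslt : s < lo + p := by
    have := hbr.1
    nlinarith
  have hdvdp : p ∣ s := Dvd.intro q (by rw [hs, mul_comm])
  have hdvd : period ∣ s := (abs_dvd period s).mp hdvdp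
  have hmin : ∀ u : Int, lo ≤ u → period ∣ u → s ≤ u := by
    intro u hu hdu
    obtain ⟨k, hk⟩ := (abs_dvd period u).mpr hdu
    have hqk : q ≤ k := by
      by_contra hlt
      push Not at hlt
      have hk1 : k ≤ q - 1 := by omega
      have : u ≤ (q - 1) * p := by
        rw [hk, ← hpdef, mul_comm p k]
        exact mul_le_mul_of_nonneg_right hk1 (le_of_lt hppos)
      omega
    have : q * p ≤ k * p := mul_le_mul_of_nonneg_right hqk (le_of_lt hppos)
    rw [hs, hk, ← hpdef, mul_comm p k]
    exact this
  have hres := pvLoopA_eq transient period s hs1 hdvd hmin (lo + p).toNat 1 le_rfl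
    (by omega)
    (by
      have h2 : (2 : Int) ≤ lo + p := by omega
      have := Int.toNat_of_nonneg (by omega : (0:Int) ≤ lo + p)
      omega)
  have h3 : (2 : Int) = 1 + 1 := by norm_num
  have h4 : (3 : Int) = 2 * 1 + 1 := by norm_num
  rw [h3, h4]
  exact hres

-- ===== VERDICT (by name: the statement is the Claim_ definition above) =====
theorem meetingtime_spec : Claim_equal_meetingtime := by
  intro pt _ hpre
  obtain ⟨hlen, hnz⟩ := hpre
  rcases pt with _ | ⟨a, _ | ⟨b, rest⟩⟩
  · simp at hlen
  · simp at hlen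
  · have h0 : PySem.List.pyGet? (a :: b :: rest) 0 = some a :=
      PySem.List.pyGet?_zero_cons a (b :: rest)
    have h1 : PySem.List.pyGet? (a :: b :: rest) 1 = some b := by
      have h : (1 : Int) = ((0 : Nat) : Int) + 1 := by norm_num
      rw [h, PySem.List.pyGet?_cons_succ]
      exact_mod_cast PySem.List.pyGet?_zero_cons b rest
    have hb : b ≠ 0 := by
      intro h
      exact hnz (by rw [h1, h])
    show meetingtime _ = meetingtime_alt _
    unfold meetingtime meetingtime_alt
    rw [h0, h1]
    simp only [Option.bind_some, Option.map_some, Option.getD_some]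
    exact meetingtime_main a b hb
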